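-- pv_equiv track=rewrite | github.com/SuperAsneiitor/timerParse | lib/format2_parser.py | _last_numeric_tokens
-- ===== SOURCE A (Python) =====
-- def _last_numeric_tokens(text: str, n: int) -> list[str]:
--     """从文本中取最后 n 个“像数字”的 token（用 split，不用正则）。"""
--     parts = text.strip().split()
--     out: list[str] = []
--     for i in range(len(parts) - 1, -1, -1):
--         if len(out) >= n:
--             break
--         s = parts[i]
--         if not s:
--             continue
--         if s.lstrip("-").replace(".", "", 1).isdigit():
--             out.append(s)
--     out.reverse()
--     return out
-- ===== SOURCE B (Python) =====
-- def _last_numeric_tokens(text: str, n: int) -> list[str]: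
--     if n <= 0:
--         return []
--     nums = [s for s in text.strip().split()
--             if s.lstrip("-").replace(".", "", 1).isdigit()]
--     return nums[-n:]
-- ===== Notes on version B (the rewrite author's own statement) =====
-- stated objective: simpler
-- what changed: Replaces the reverse index scan with early break and trailing in-place reverse by a forward filtering comprehension plus a single tail slice nums[-n:], with an explicit n <= 0 early return.
import Mathlib
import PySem

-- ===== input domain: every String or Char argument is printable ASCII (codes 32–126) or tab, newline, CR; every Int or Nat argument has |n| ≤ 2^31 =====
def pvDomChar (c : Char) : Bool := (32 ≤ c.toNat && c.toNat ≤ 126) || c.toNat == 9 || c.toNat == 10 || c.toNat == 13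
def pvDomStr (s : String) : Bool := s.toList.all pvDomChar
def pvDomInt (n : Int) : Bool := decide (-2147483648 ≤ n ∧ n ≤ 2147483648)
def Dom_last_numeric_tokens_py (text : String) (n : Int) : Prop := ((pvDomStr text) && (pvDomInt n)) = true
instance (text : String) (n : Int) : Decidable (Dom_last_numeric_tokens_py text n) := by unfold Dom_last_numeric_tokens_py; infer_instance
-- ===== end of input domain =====

-- B replaces A's reverse index scan + trailing reverse by a forward filter and a tail slice (simpler decomposition, same cost).

-- shared predicate: s.lstrip("-").replace(".", "", 1).isdigit()
-- lstrip("-") = drop leading '-' chars (exact: the strip set is the single char '-');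
-- replace(".", "", 1) = remove the first '.' if any (exact: old is one char, count 1)
def pvNumLike (s : String) : Bool :=
  PySem.Chars.strIsdigit ((s.toList.dropWhile (· == '-')).erase '.')

-- ===== PORT A =====
-- the for-loop over range(len(parts)-1, -1, -1) with break/continue
def pvALoop (parts : List String) (n : Int) : List Int → List String → List String
  | [], out => out
  | i :: rest, out =>
    if (out.length : Int) ≥ n then out
    else
      let s := PySem.List.pyGetD parts i ""
      if s == "" then pvALoop parts n rest out
      else if pvNumLike s then pvALoop parts n rest (out ++ [s])
      else pvALoop parts n rest out

def last_numeric_tokens_py (text : String) (n : Int) : List String :=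
  let parts := PySem.Str.split₀ (PySem.Str.strip text)
  (pvALoop parts n (PySem.List.pyRange ((parts.length : Int) - 1) (-1) (-1)) []).reverse

-- ===== PORT B =====
def last_numeric_tokens_py_alt (text : String) (n : Int) : List String :=
  if n ≤ 0 then []
  else
    let nums := (PySem.Str.split₀ (PySem.Str.strip text)).filter pvNumLike
    PySem.List.slice nums (some (-n)) none

-- ===== PRECONDITION & SPEC =====
def Spec_last_numeric_tokens_py (text : String) (n : Int) (out : List String) : Prop := out = last_numeric_tokens_py_alt text n
instance (text : String) (n : Int) (out : List String) : Decidable (Spec_last_numeric_tokens_py text n out) := by unfold Spec_last_numeric_tokens_py; infer_instance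

-- ===== CLAIM (what is proved, stated in full; the proofs are below) =====
def Claim_equal_last_numeric_tokens_py : Prop := ∀ (text : String) (n : Int), Dom_last_numeric_tokens_py text n → Spec_last_numeric_tokens_py text n (last_numeric_tokens_py text n)

-- ===== LEMMAS AND PROOFS =====

lemma pvNumLike_empty : pvNumLike "" = false := by decide

-- the reverse scan collects, onto out, the first (n - |out|) numeric-looking tokens of parts.take k read backwards
lemma pvALoop_eq (parts : List String) (n : Int) :
    ∀ (k : Nat), k ≤ parts.length → ∀ (out : List String),
      pvALoop parts n (PySem.List.pyRange ((k : Int) - 1) (-1) (-1)) out =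
        out ++ (((parts.take k).reverse.filter pvNumLike).take ((n - out.length).toNat)) := by
  intro k
  induction k with
  | zero =>
    intro _ out
    rw [PySem.List.pyRange_neg_one_eq_nil (by omega)]
    simp [pvALoop]
  | succ k ih =>
    intro hk out
    have hk' : k < parts.length := by omega
    rw [show ((k + 1 : Nat) : Int) - 1 = (k : Int) by push_cast; ring]
    rw [PySem.List.pyRange_neg_one_cons (by omega)]
    have hget : PySem.List.pyGetD parts (k : Int) "" = parts[k] := by
      simp [PySem.List.pyGetD, PySem.List.pyGet?, PySem.List.pyIdx?, hk']
    have htake : (parts.take (k + 1)).reverse = parts[k] :: (parts.take k).reverse := by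
      rw [List.take_add_one]
      simp [List.getElem?_eq_getElem hk']
    by_cases hge : (out.length : Int) ≥ n
    · have : (n - (out.length : Int)).toNat = 0 := by omega
      simp [pvALoop, hge, this]
    · simp only [pvALoop, hge, if_false, hget, htake]
      by_cases hemp : parts[k] == ""
      · have hpe : pvNumLike parts[k] = false := by
          rw [eq_of_beq hemp]; exact pvNumLike_empty
        simp only [hemp, if_true]
        rw [ih (by omega) out]
        simp [hpe]
      · simp only [hemp]
        by_cases hnl : pvNumLike parts[k]
        · simp only [hnl, if_true]
          rw [ih (by omega) (out ++ [parts[k]])]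
          have hsucc : (n - (out.length : Int)).toNat = (n - ((out ++ [parts[k]]).length : Int)).toNat + 1 := by
            simp only [List.length_append, List.length_cons, List.length_nil]
            omega
          rw [List.filter_cons_of_pos hnl, hsucc, List.take_succ_cons]
          simp
        · simp only [hnl]
          rw [ih (by omega) out]
          simp [hnl]

-- (l.reverse.take m).reverse = l.drop (l.length - m)
lemma pvRevTakeRev {α : Type} (l : List α) (m : Nat) :
    (l.reverse.take m).reverse = l.drop (l.length - m) := by
  rw [List.take_reverse]
  simp

lemma pvA_closed (text : String) (n : Int) :
    last_numeric_tokens_py text n =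
      ((PySem.Str.split₀ (PySem.Str.strip text)).filter pvNumLike).drop
        ((((PySem.Str.split₀ (PySem.Str.strip text)).filter pvNumLike).length) - n.toNat) := by
  show (pvALoop (PySem.Str.split₀ (PySem.Str.strip text)) n
      (PySem.List.pyRange (((PySem.Str.split₀ (PySem.Str.strip text)).length : Int) - 1) (-1) (-1))
      []).reverse = _
  rw [pvALoop_eq _ n _ (le_refl _) []]
  simp only [List.length_nil, Nat.cast_zero, sub_zero, List.nil_append, List.take_length]
  rw [List.filter_reverse, pvRevTakeRev]

-- ===== VERDICT (by name: the statement is the Claim_ definition above) =====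
theorem last_numeric_tokens_py_spec : Claim_equal_last_numeric_tokens_py := by
  intro text n _
  unfold Spec_last_numeric_tokens_py
  rw [pvA_closed]
  unfold last_numeric_tokens_py_alt
  by_cases hn : n ≤ 0
  · simp [hn, Int.toNat_of_nonpos hn]
  · have hpos : 0 < n := by omega
    have hk : 0 < n.toNat := by omega
    have hcast : -n = -((n.toNat : Int)) := by omega
    simp only [hn, if_false]
    rw [hcast, PySem.List.slice_from_neg_natCast _ _ hk]
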